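-- pv_equiv track=rewrite | github.com/SivanBitan/LexicographicalTreeOrdering | main.py | ruskey_isFeasible
-- ===== SOURCE A (Python) =====
-- def ruskey_isFeasible(l, n):
--     temp_n = n
--     temp_l = l
--     if (len(l) != n):
--         return False
--     while True:
--         next_temp_l = list()
--         i = 0
--         flag = True
--         while (i < temp_n):
--             if (i != temp_n - 1):
--                 if (flag and temp_l[i] == temp_l[i + 1]):
--                     next_temp_l.append(temp_l[i] - 1)
--                     i += 2
--                     flag = False
--                 else:
--                     next_temp_l.append(temp_l[i])
--                     i += 1
--             else:
--                 next_temp_l.append(temp_l[i])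
--                 i += 1
--         if (len(next_temp_l) == 1 and next_temp_l[0] == 0):
--             return True
--         elif (len(next_temp_l) == len(temp_l)):
--             return False
--         temp_l = next_temp_l.copy()
--         temp_n = len(temp_l)
--         next_temp_l = list()
-- ===== SOURCE B (Python) =====
-- def ruskey_isFeasible(l, n):
--     if len(l) != n:
--         return False
--     stack = []
--     for x in l:
--         while stack and stack[-1] == x:
--             stack.pop()
--             x -= 1
--         stack.append(x)
--     return stack == [0]
-- ===== Notes on version B (the rewrite author's own statement) =====
-- stated objective: alternative
-- what changed: Replaces A's repeated full passes (each pass merging only the leftmost adjacent equal pair, then rescanning from scratch) with a single left-to-right stack collapse that merges pairs eagerly; feasible iff the final stack is [0].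
import Mathlib
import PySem

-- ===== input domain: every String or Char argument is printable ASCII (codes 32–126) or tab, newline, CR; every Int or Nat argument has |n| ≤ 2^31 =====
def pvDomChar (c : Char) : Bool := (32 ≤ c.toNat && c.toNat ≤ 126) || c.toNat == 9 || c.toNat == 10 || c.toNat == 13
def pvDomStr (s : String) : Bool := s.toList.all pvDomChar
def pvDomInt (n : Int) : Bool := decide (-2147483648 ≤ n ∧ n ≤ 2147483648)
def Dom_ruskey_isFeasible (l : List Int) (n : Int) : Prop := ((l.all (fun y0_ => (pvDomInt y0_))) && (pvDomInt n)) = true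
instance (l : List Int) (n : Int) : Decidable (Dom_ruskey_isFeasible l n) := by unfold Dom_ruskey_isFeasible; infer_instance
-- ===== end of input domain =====

-- B replaces A's repeated whole-list passes (one merge per pass, then rescan) with a single
-- left-to-right stack collapse that merges eagerly; objective: alternative algorithm.

-- ===== PORT A =====
-- inner while loop of A; the fuel only makes the recursion structural (one unit per iteration,
-- fuel = tn at the call covers every iteration since i starts at 0 and grows each round);
-- i and i+1 are always in range (0 ≤ i < tn = length tl), so pyGetD's default is never used
def ruskeyPass (fuel : Nat) (tl : List Int) (tn : Int) (i : Int) (flag : Bool) (next : List Int) : List Int :=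
  match fuel with
  | 0 => next
  | fuel + 1 =>
    if i < tn then
      if i ≠ tn - 1 then
        if flag ∧ PySem.List.pyGetD tl i 0 = PySem.List.pyGetD tl (i + 1) 0 then
          ruskeyPass fuel tl tn (i + 2) false (next ++ [PySem.List.pyGetD tl i 0 - 1])
        else
          ruskeyPass fuel tl tn (i + 1) flag (next ++ [PySem.List.pyGetD tl i 0])
      else
        ruskeyPass fuel tl tn (i + 1) flag (next ++ [PySem.List.pyGetD tl i 0])
    else next

-- outer while loop of A; temp_n is always len(temp_l) (initially n = len(l) after the guard);
-- the fuel only makes the recursion structural (the list shrinks every iteration that recurses,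
-- so fuel = len(l) + 1 at the call covers every iteration)
def ruskeyLoop (fuel : Nat) (tl : List Int) : Bool :=
  match fuel with
  | 0 => false
  | fuel + 1 =>
    let next := ruskeyPass tl.length tl (tl.length : Int) 0 true []
    if next.length = 1 ∧ PySem.List.pyGetD next 0 0 = 0 then true
    else if next.length = tl.length then false
    else ruskeyLoop fuel next

def ruskey_isFeasible (l : List Int) (n : Int) : Bool :=
  if (l.length : Int) ≠ n then false else ruskeyLoop (l.length + 1) l

-- ===== PORT B =====
-- B's inner 'while stack and stack[-1] == x: stack.pop(); x -= 1' followed by 'stack.append(x)';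
-- the stack is held top-first (head = Python's stack[-1]); the final 'stack == [0]' is unaffected
def pushStep : List Int → Int → List Int
  | [], x => [x]
  | t :: rest, x => if t = x then pushStep rest (x - 1) else x :: t :: rest

def ruskey_isFeasible_alt (l : List Int) (n : Int) : Bool :=
  if (l.length : Int) ≠ n then false
  else decide (l.foldl pushStep [] = [0])

-- ===== PRECONDITION & SPEC =====
def Spec_ruskey_isFeasible (l : List Int) (n : Int) (out : Bool) : Prop := out = ruskey_isFeasible_alt l n
instance (l : List Int) (n : Int) (out : Bool) : Decidable (Spec_ruskey_isFeasible l n out) := by unfold Spec_ruskey_isFeasible; infer_instance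

-- ===== CLAIM (what is proved, stated in full; the proofs are below) =====
def Claim_equal_ruskey_isFeasible : Prop := ∀ (l : List Int) (n : Int), Dom_ruskey_isFeasible l n → Spec_ruskey_isFeasible l n (ruskey_isFeasible l n)

-- ===== LEMMAS AND PROOFS =====

-- list-level description of one pass of A: merge the leftmost adjacent equal pair, once
def passL : Bool → List Int → List Int
  | false, l => l
  | true, [] => []
  | true, [a] => [a]
  | true, a :: b :: r => if a = b then (a - 1) :: r else a :: passL true (b :: r)

theorem passL_nil (flag : Bool) : passL flag [] = [] := by cases flag <;> rfl

theorem passL_singleton (flag : Bool) (a : Int) : passL flag [a] = [a] := by cases flag <;> rfl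

-- A's index loop computes exactly passL on the remaining suffix (fuel covers the iterations left)
theorem ruskeyPass_eq_passL (fuel : Nat) (tl : List Int) (i : Int) (flag : Bool) (next : List Int)
    (hi : 0 ≤ i) (hfuel : tl.length - i.toNat ≤ fuel) :
    ruskeyPass fuel tl (tl.length : Int) i flag next = next ++ passL flag (tl.drop i.toNat) := by
  induction fuel generalizing i flag next with
  | zero =>
    have : tl.drop i.toNat = [] := by apply List.drop_eq_nil_of_le; omega
    rw [this, passL_nil, ruskeyPass]
    simp
  | succ fuel ih =>
    rw [ruskeyPass]
    by_cases h : i < (tl.length : Int)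
    · rw [if_pos h]
      have hk : i.toNat < tl.length := by omega
      have hg : PySem.List.pyGetD tl i 0 = tl[i.toNat] :=
        PySem.List.pyGetD_eq_getElem tl 0 hi (by exact_mod_cast h)
      by_cases hne : i ≠ (tl.length : Int) - 1
      · rw [if_pos hne]
        have hk1 : i.toNat + 1 < tl.length := by omega
        have hg1 : PySem.List.pyGetD tl (i+1) 0 = tl[i.toNat + 1] := by
          have := PySem.List.pyGetD_eq_getElem tl (i := i+1) 0 (by omega) (by omega)
          simpa [show (i+1).toNat = i.toNat + 1 by omega] using this
        have hdrop : tl.drop i.toNat = tl[i.toNat] :: tl[i.toNat+1] :: tl.drop (i.toNat + 2) := by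
          rw [List.drop_eq_getElem_cons hk, List.drop_eq_getElem_cons hk1]
        by_cases hc : flag ∧ PySem.List.pyGetD tl i 0 = PySem.List.pyGetD tl (i + 1) 0
        · rw [if_pos hc]
          obtain ⟨hf, heq⟩ := hc
          rw [ih (i+2) false (next ++ [PySem.List.pyGetD tl i 0 - 1]) (by omega) (by omega), hdrop]
          subst hf
          rw [hg, hg1] at heq
          simp [passL, show (i+2).toNat = i.toNat + 2 by omega, hg, heq]
        · rw [if_neg hc]
          rw [ih (i+1) flag (next ++ [PySem.List.pyGetD tl i 0]) (by omega) (by omega), hdrop]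
          have hd1 : tl.drop (i+1).toNat = tl[i.toNat+1] :: tl.drop (i.toNat + 2) := by
            rw [show (i+1).toNat = i.toNat + 1 by omega, List.drop_eq_getElem_cons hk1]
          rw [hd1]
          cases flag with
          | false => simp [passL, hg]
          | true =>
            have hne' : tl[i.toNat] ≠ tl[i.toNat+1] := by
              intro he; exact hc ⟨rfl, by rw [hg, hg1, he]⟩
            simp [passL, hg, hne']
      · rw [if_neg hne]
        have hlast : i = (tl.length : Int) - 1 := by omega
        have hdrop : tl.drop i.toNat = [tl[i.toNat]] := by
          rw [List.drop_eq_getElem_cons hk]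
          have : tl.drop (i.toNat + 1) = [] := by
            apply List.drop_eq_nil_of_le; omega
          rw [this]
        have hdrop1 : tl.drop (i+1).toNat = [] := by
          apply List.drop_eq_nil_of_le; omega
        rw [ih (i+1) flag (next ++ [PySem.List.pyGetD tl i 0]) (by omega) (by omega),
          hdrop1, hdrop, passL_nil, passL_singleton, hg]
        simp
    · rw [if_neg h]
      have : tl.drop i.toNat = [] := by apply List.drop_eq_nil_of_le; omega
      rw [this, passL_nil]
      simp

-- a pass is the identity exactly on lists with no adjacent equal pair …
theorem passL_of_chain (l : List Int) (h : List.IsChain (· ≠ ·) l) : passL true l = l := by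
  fun_induction passL true l with
  | case1 => rfl
  | case2 => rfl
  | case3 => rfl
  | case4 b r =>
    rw [List.isChain_cons_cons] at h
    exact absurd rfl h.1
  | case5 a b r hab ih =>
    rw [List.isChain_cons_cons] at h
    rw [ih h.2]

-- … and otherwise shortens the list by exactly one
theorem passL_length_of_not_chain (flag : Bool) (l : List Int) (hf : flag = true)
    (h : ¬ List.IsChain (· ≠ ·) l) : (passL flag l).length + 1 = l.length := by
  fun_induction passL flag l with
  | case1 => simp at hf
  | case2 => exact absurd List.IsChain.nil h
  | case3 => exact absurd (List.IsChain.singleton _) h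
  | case4 b r => simp
  | case5 a b r hab ih =>
    have hr : ¬ List.IsChain (· ≠ ·) (b :: r) := fun hc => h (List.isChain_cons_cons.mpr ⟨hab, hc⟩)
    have := ih rfl hr
    simp only [List.length_cons] at this ⊢
    omega

-- the stack collapse absorbs one leftmost merge (stack top ≠ next element as side condition)
theorem foldl_pushStep_passL (l : List Int) (st : List Int)
    (hb : ∀ t, st.head? = some t → ∀ x, l.head? = some x → t ≠ x) :
    List.foldl pushStep st (passL true l) = List.foldl pushStep st l := by
  fun_induction passL true l generalizing st with
  | case1 => rfl
  | case2 => rfl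
  | case3 => rfl
  | case4 a r =>
    have h1 : pushStep st a = a :: st := by
      cases st with
      | nil => rfl
      | cons t rest => simp [pushStep, hb t rfl a rfl]
    have h2 : pushStep (pushStep st a) a = pushStep st (a - 1) := by
      rw [h1]; simp [pushStep]
    simp only [List.foldl_cons, h2]
  | case5 a b r hab ih =>
    have h1 : pushStep st a = a :: st := by
      cases st with
      | nil => rfl
      | cons t rest => simp [pushStep, hb t rfl a rfl]
    simp only [List.foldl_cons, h1]
    exact ih (a :: st) (by intro t ht x hx; simp at ht hx; subst ht; subst hx; exact hab)

-- on a fully reduced list the stack collapse just reverses the list onto the stack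
theorem foldl_pushStep_of_chain (l : List Int) : ∀ (st : List Int),
    List.IsChain (· ≠ ·) l →
    (∀ t, st.head? = some t → ∀ x, l.head? = some x → t ≠ x) →
    List.foldl pushStep st l = l.reverse ++ st := by
  induction l with
  | nil => intro st _ _; rfl
  | cons a r ih =>
    intro st hc hb
    have h1 : pushStep st a = a :: st := by
      cases st with
      | nil => rfl
      | cons t rest => simp [pushStep, hb t rfl a rfl]
    rw [List.isChain_cons] at hc
    simp only [List.foldl_cons, h1]
    rw [ih (a :: st) hc.2 (by intro t ht x hx; simp at ht; subst ht; exact hc.1 x hx)]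
    simp

theorem ruskeyLoop_eq (fuel : Nat) (tl : List Int) (hfuel : tl.length < fuel) :
    ruskeyLoop fuel tl = decide (List.foldl pushStep [] tl = [0]) := by
  induction fuel generalizing tl with
  | zero => omega
  | succ fuel ih =>
    rw [ruskeyLoop]
    have hnext : ruskeyPass tl.length tl (tl.length : Int) 0 true [] = passL true tl := by
      simpa using ruskeyPass_eq_passL tl.length tl 0 true [] le_rfl (by omega)
    rw [hnext]
    by_cases h1 : (passL true tl).length = 1 ∧ PySem.List.pyGetD (passL true tl) 0 0 = 0
    · rw [if_pos h1]
      obtain ⟨hlen, hz⟩ := h1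
      obtain ⟨v, hv⟩ : ∃ v, passL true tl = [v] := List.length_eq_one_iff.mp hlen
      have hv0 : v = 0 := by
        rw [hv] at hz
        simpa [PySem.List.pyGetD_zero] using hz
      have : List.foldl pushStep [] tl = [0] := by
        have habs := foldl_pushStep_passL tl [] (by simp)
        rw [← habs, hv, hv0]
        rfl
      simp [this]
    · rw [if_neg h1]
      by_cases h2 : (passL true tl).length = tl.length
      · rw [if_pos h2]
        have hchain : List.IsChain (· ≠ ·) tl := by
          by_contra hc
          have := passL_length_of_not_chain true tl rfl hc
          omega
        have hfix : passL true tl = tl := passL_of_chain tl hchain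
        have hfold : List.foldl pushStep [] tl = tl.reverse := by
          have := foldl_pushStep_of_chain tl [] hchain (by simp)
          simpa using this
        have htl : tl ≠ [0] := by
          intro he
          apply h1
          rw [hfix, he]
          exact ⟨rfl, rfl⟩
        have : List.foldl pushStep [] tl ≠ [0] := by
          rw [hfold]
          intro he
          apply htl
          have : tl.reverse.reverse = List.reverse [0] := by rw [he]
          simpa using this
        simp [this]
      · rw [if_neg h2]
        have hshort : (passL true tl).length < tl.length := by
          have hnc : ¬ List.IsChain (· ≠ ·) tl := by
            intro hc
            exact h2 (by rw [passL_of_chain tl hc])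
          have := passL_length_of_not_chain true tl rfl hnc
          omega
        rw [ih (passL true tl) (by omega)]
        have habs : List.foldl pushStep [] (passL true tl) = List.foldl pushStep [] tl :=
          foldl_pushStep_passL tl [] (by simp)
        rw [habs]

-- ===== VERDICT (by name: the statement is the Claim_ definition above) =====
theorem ruskey_isFeasible_spec : Claim_equal_ruskey_isFeasible := by
  intro l n _
  unfold Spec_ruskey_isFeasible ruskey_isFeasible ruskey_isFeasible_alt
  split
  · rfl
  · exact ruskeyLoop_eq (l.length + 1) l (by omega)
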